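-- pv_equiv track=rewrite | github.com/joshanashakya/dissertation | workspace/dataset/java-python/GeeksForGeeks/3795/A/2.py | solve
-- ===== SOURCE A (Python) =====
-- def solve(Array, N, K) :
--
--     # Initialize the count Array
--     count_Arr = [0]*(N + 2) ;
--     factor = 1;
--     size = N;
--
--     # Reduce N repeatedly to half its value
--     while (size) :
--         start = 1;
--         end = size;
--
--         # Add count to start
--         count_Arr[1] += factor * N;
--
--         # Subtract same count after end index
--         count_Arr[end + 1] -= factor * N;
--         factor += 1;
--         size //= 2;
--
--     for i in range(2, N + 1) :
--         count_Arr[i] += count_Arr[i - 1];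
--
--     # Store each element of Array[] with their count
--     element = [];
--
--     for i in range(N) :
--         element.append(( Array[i], count_Arr[i + 1] ));
--
--     # Sort the elements wrt value
--     element.sort();
--
--     start = 1;
--     for i in range(N) :
--         end = start + element[i][1] - 1;
--
--         # If Kth element is in range of element[i]
--         # return element[i]
--         if (K >= start and K <= end) :
--             return element[i][0];
--
--         start += element[i][1];
--
--     # If K is out of bound
--     return -1;
-- ===== SOURCE B (Python) =====
-- def solve(Array, N, K):
--     # Halving sizes N, N//2, ... ; the weight of 1-indexed position p is
--     # N * t*(t+1)//2 where t = number of levels of size >= p (closed form for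
--     # A's difference-array + prefix-sum construction).
--     levels = []
--     s = N
--     while s:
--         levels.append(s)
--         s //= 2
--     element = sorted(
--         (Array[i], N * t * (t + 1) // 2)
--         for i in range(N)
--         for t in [sum(1 for l in levels if l >= i + 1)]
--     )
--     if K >= 1:
--         cum = 0
--         for v, w in element:
--             cum += w
--             if K <= cum:
--                 return v
--     return -1
-- ===== Notes on version B (the rewrite author's own statement) =====
-- stated objective: alternative
-- what changed: B replaces A's difference-array-plus-prefix-sum construction of the weight table by a closed-form triangular-number weight per position (weight = N*t*(t+1)//2 with t the number of halving levels covering the position) and replaces the start/end range bookkeeping of the final scan by a single cumulative-sum scan.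
import Mathlib
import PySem

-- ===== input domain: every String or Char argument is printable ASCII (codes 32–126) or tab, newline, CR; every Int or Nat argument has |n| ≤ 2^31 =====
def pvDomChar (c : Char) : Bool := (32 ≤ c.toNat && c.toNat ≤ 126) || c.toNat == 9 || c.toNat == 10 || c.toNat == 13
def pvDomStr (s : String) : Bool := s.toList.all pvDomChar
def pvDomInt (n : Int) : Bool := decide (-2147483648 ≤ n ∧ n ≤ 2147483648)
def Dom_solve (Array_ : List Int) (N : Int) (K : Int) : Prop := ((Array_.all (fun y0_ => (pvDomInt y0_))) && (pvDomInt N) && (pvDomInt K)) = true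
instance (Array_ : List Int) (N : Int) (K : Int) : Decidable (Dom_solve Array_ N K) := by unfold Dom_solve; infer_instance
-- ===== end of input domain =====

-- B replaces A's difference-array + prefix-sum weight table by a closed-form
-- triangular-number weight per position and the start/end range scan by a
-- cumulative-sum scan; objective: alternative (same asymptotic cost).


-- ===== PORT A =====
-- The while loop: size is represented as a Nat (exact for the admitted inputs,
-- where 0 ≤ N); each iteration does count_Arr[1] += factor*N;
-- count_Arr[size+1] -= factor*N; factor += 1; size //= 2.
def whileStep (s : Nat) (factor n : Int) (arr : List Int) : List Int :=
  let arr1 := arr.set 1 (arr.getD 1 0 + factor * n)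
  arr1.set (s + 2) (arr1.getD (s + 2) 0 - factor * n)

def solveWhile : Nat → Int → Int → List Int → List Int
  | 0, _, _, arr => arr
  | s + 1, factor, n, arr =>
      solveWhile ((s + 1) / 2) (factor + 1) n (whileStep s factor n arr)
  decreasing_by omega

-- for i in range(2, N + 1): count_Arr[i] += count_Arr[i - 1]
def solvePrefix (N : Int) (arr : List Int) : List Int :=
  (PySem.List.pyRange 2 (N + 1) 1).foldl
    (fun a i => PySem.List.pySetD a i (PySem.List.pyGetD a i 0 + PySem.List.pyGetD a (i - 1) 0)) arr

-- for i in range(N): element.append((Array[i], count_Arr[i + 1]))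
def solveElems (Array_ : List Int) (N : Int) (cnt : List Int) : List (Int × Int) :=
  (PySem.List.pyRange 0 N 1).foldl
    (fun acc i => acc ++ [(PySem.List.pyGetD Array_ i 0, PySem.List.pyGetD cnt (i + 1) 0)]) []

-- final loop over element (element has exactly N entries)
def solveScan (K : Int) : List (Int × Int) → Int → Int
  | [], _ => -1
  | (v, w) :: rest, start =>
      if K ≥ start ∧ K ≤ start + w - 1 then v else solveScan K rest (start + w)

def solve (Array_ : List Int) (N : Int) (K : Int) : Int :=
  solveScan K
    (PySem.List.sorted2
      (solveElems Array_ N (solvePrefix N (solveWhile N.toNat 1 N (List.replicate (N + 2).toNat (0 : Int)))))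
      Prod.fst Prod.snd) 1

-- ===== PORT B =====
-- levels = [N, N//2, N//4, ...] while nonzero (size as Nat: exact for 0 ≤ N)
def altLevels : Nat → List Int
  | 0 => []
  | s + 1 => ((s + 1 : Nat) : Int) :: altLevels ((s + 1) / 2)
  decreasing_by omega

-- weight of 1-indexed position p: N * t * (t + 1) // 2, t = #levels ≥ p
def altWeight (N : Int) (levels : List Int) (p : Int) : Int :=
  let t : Int := ((levels.filter (fun l => p ≤ l)).length : Int)
  PySem.Int.floordiv (N * t * (t + 1)) 2

def altElems (Array_ : List Int) (N : Int) (levels : List Int) : List (Int × Int) :=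
  (PySem.List.pyRange 0 N 1).map
    (fun i => (PySem.List.pyGetD Array_ i 0, altWeight N levels (i + 1)))

def altScan (K : Int) : List (Int × Int) → Int → Int
  | [], _ => -1
  | (v, w) :: rest, cum => if K ≤ cum + w then v else altScan K rest (cum + w)

def solve_alt (Array_ : List Int) (N : Int) (K : Int) : Int :=
  if 1 ≤ K then
    altScan K (PySem.List.sorted2 (altElems Array_ N (altLevels N.toNat)) Prod.fst Prod.snd) 0
  else -1

-- ===== PRECONDITION & SPEC =====
-- A raises IndexError when N < 0 (count_Arr too short for count_Arr[1]) or
-- when N > len(Array) (Array[i] out of range); Pre_ excludes exactly those.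
def Pre_solve (Array_ : List Int) (N : Int) (K : Int) : Prop :=
  0 ≤ N ∧ N ≤ Array_.length
instance (Array_ : List Int) (N : Int) (K : Int) : Decidable (Pre_solve Array_ N K) := by unfold Pre_solve; infer_instance

def pvWitness_solve : List Int × Int × Int := ([3, 1, 2], 3, 5)

def Spec_solve (Array_ : List Int) (N : Int) (K : Int) (out : Int) : Prop := out = solve_alt Array_ N K
instance (Array_ : List Int) (N : Int) (K : Int) (out : Int) : Decidable (Spec_solve Array_ N K out) := by unfold Spec_solve; infer_instance

-- ===== CLAIM (what is proved, stated in full; the proofs are below) =====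
def Claim_equal_solve : Prop := ∀ (Array_ : List Int) (N : Int) (K : Int), Dom_solve Array_ N K → Pre_solve Array_ N K → Spec_solve Array_ N K (solve Array_ N K)

-- ===== LEMMAS AND PROOFS =====

-- prefix sums of positions 1..p of a list (Python's running accumulation target)
def psum (arr : List Int) : Nat → Int
  | 0 => 0
  | p + 1 => psum arr p + arr.getD (p + 1) 0

-- net contribution of the while loop, seen through psum at position p
def wsum : Nat → Int → Nat → Int
  | 0, _, _ => 0
  | s + 1, f, p => (if p ≤ s + 1 then f else 0) + wsum ((s + 1) / 2) (f + 1) p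
  decreasing_by omega

theorem getD_set_eq (l : List Int) (n : Nat) (v : Int) (h : n < l.length) :
    (l.set n v).getD n 0 = v := by
  simp [List.getD, h]

theorem getD_set_ne (l : List Int) (n j : Nat) (v : Int) (h : n ≠ j) :
    (l.set n v).getD j 0 = l.getD j 0 := by
  simp [List.getD, List.getElem?_set_ne h]

theorem psum_set_add (arr : List Int) (j : Nat) (c : Int) (hj : 1 ≤ j) (hl : j < arr.length) :
    ∀ p, psum (arr.set j (arr.getD j 0 + c)) p = psum arr p + (if j ≤ p then c else 0) := by
  intro p
  induction p with
  | zero => simp only [psum]; rw [if_neg (by omega)]; ring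
  | succ p ih =>
      simp only [psum]
      by_cases h : j = p + 1
      · subst h
        rw [ih, getD_set_eq arr _ _ hl, if_neg (by omega), if_pos (by omega)]
        ring
      · rw [ih, getD_set_ne arr j (p + 1) _ h]
        by_cases h2 : j ≤ p
        · rw [if_pos h2, if_pos (by omega)]; ring
        · rw [if_neg h2, if_neg (by omega)]; ring

theorem psum_replicate (L : Nat) : ∀ p, psum (List.replicate L (0 : Int)) p = 0 := by
  intro p
  induction p with
  | zero => rfl
  | succ p ih =>
      simp only [psum, ih, zero_add]
      simp [List.getD, List.getElem?_replicate]
      split <;> simp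

theorem length_whileStep (s : Nat) (f n : Int) (arr : List Int) :
    (whileStep s f n arr).length = arr.length := by
  simp [whileStep]

theorem length_solveWhile (s : Nat) (f n : Int) (arr : List Int) :
    (solveWhile s f n arr).length = arr.length := by
  fun_induction solveWhile s f n arr with
  | case1 => rfl
  | case2 s f n arr ih => rw [ih, length_whileStep]

theorem psum_whileStep (s : Nat) (f n : Int) (arr : List Int) (p : Nat)
    (hp : 1 ≤ p) (hl : s + 3 ≤ arr.length) :
    psum (whileStep s f n arr) p = psum arr p + n * (if p ≤ s + 1 then f else 0) := by
  have h2 : s + 2 < (arr.set 1 (arr.getD 1 0 + f * n)).length := by simp; omega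
  simp only [whileStep, sub_eq_add_neg]
  rw [psum_set_add _ _ _ (by omega) h2 p, psum_set_add _ _ _ (by omega) (by omega) p,
      if_pos hp]
  by_cases h : s + 2 ≤ p
  · rw [if_pos h, if_neg (by omega)]; ring
  · rw [if_neg h, if_pos (by omega)]; ring

theorem psum_solveWhile (s : Nat) (f n : Int) (arr : List Int) (p : Nat)
    (hp : 1 ≤ p) (hl : s + 2 ≤ arr.length) :
    psum (solveWhile s f n arr) p = psum arr p + n * wsum s f p := by
  fun_induction solveWhile s f n arr with
  | case1 => simp [wsum]
  | case2 s f n arr ih =>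
      rw [ih (by rw [length_whileStep]; omega),
          psum_whileStep s f n arr p hp (by omega), wsum]
      ring

-- characterization of the for-loop doing count_Arr[i] += count_Arr[i-1], i = 2..m
theorem length_solvePrefix_fold (l : List Int) (arr : List Int) :
    ((l).foldl (fun a i => PySem.List.pySetD a i (PySem.List.pyGetD a i 0 + PySem.List.pyGetD a (i - 1) 0)) arr).length = arr.length := by
  induction l generalizing arr with
  | nil => rfl
  | cons x l ih => simp [ih, PySem.List.length_pySetD]

theorem prefix_char (m : Nat) (arr : List Int) (hm : m < arr.length) :
    ∀ j : Nat, 1 ≤ j →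
      ((PySem.List.pyRange 2 ((m : Int) + 1) 1).foldl
        (fun a i => PySem.List.pySetD a i (PySem.List.pyGetD a i 0 + PySem.List.pyGetD a (i - 1) 0)) arr).getD j 0
      = if j ≤ m then psum arr j else arr.getD j 0 := by
  induction m with
  | zero =>
      intro j hj
      rw [PySem.List.pyRange_one_eq_nil (by omega)]
      simp only [List.foldl_nil]
      rw [if_neg (by omega)]
  | succ m ih =>
      intro j hj
      by_cases hm0 : m = 0
      · subst hm0
        rw [show (((0 + 1 : Nat) : Int)) + 1 = (2 : Int) by norm_num,
            PySem.List.pyRange_one_eq_nil (by omega)]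
        simp only [List.foldl_nil]
        by_cases h : j ≤ 1
        · have hj1 : j = 1 := by omega
          subst hj1
          rw [if_pos (by omega)]
          simp [psum]
        · rw [if_neg (by omega)]
      · rw [show (((m + 1 : Nat) : Int) + 1) = ((m : Int) + 1) + 1 by push_cast; ring,
            PySem.List.pyRange_one_succ_right (by omega), List.foldl_append]
        simp only [List.foldl_cons, List.foldl_nil]
        set prev := ((PySem.List.pyRange 2 ((m : Int) + 1) 1).foldl
          (fun a i => PySem.List.pySetD a i (PySem.List.pyGetD a i 0 + PySem.List.pyGetD a (i - 1) 0)) arr) with hprev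
        have ihm := ih (by omega)
        have hlen : prev.length = arr.length := length_solvePrefix_fold _ arr
        have e1 : (m : Int) + 1 = ((m + 1 : Nat) : Int) := by push_cast; ring
        rw [e1, PySem.List.pySetD_natCast, PySem.List.pyGetD_natCast,
            show (((m + 1 : Nat) : Int)) - 1 = ((m : Nat) : Int) by push_cast; ring,
            PySem.List.pyGetD_natCast]
        have hval : prev.getD (m + 1) 0 + prev.getD m 0 = psum arr (m + 1) := by
          rw [ihm (m + 1) (by omega), ihm m (by omega), if_neg (by omega), if_pos (le_refl m)]
          simp only [psum]
          ring
        by_cases h : j = m + 1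
        · subst h
          rw [getD_set_eq _ _ _ (by omega), hval, if_pos (le_refl _)]
        · rw [getD_set_ne _ _ _ _ (by omega), ihm j hj]
          by_cases h2 : j ≤ m
          · rw [if_pos h2, if_pos (by omega)]
          · rw [if_neg h2, if_neg (by omega)]

-- every level of altLevels s is ≤ s
theorem altLevels_le (s : Nat) : ∀ l ∈ altLevels s, l ≤ (s : Int) := by
  fun_induction altLevels s with
  | case1 => simp
  | case2 s ih =>
      intro l hl
      simp at hl
      rcases hl with h | h
      · omega
      · have := ih l h; push_cast at this ⊢; omega

-- count of levels ≥ p (p a positive Nat position)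
def cntP (s : Nat) (p : Nat) : Nat := (altLevels s).countP (fun l => decide ((p : Int) ≤ l))

theorem cntP_zero (s : Nat) (p : Nat) (h : s < p) : cntP s p = 0 := by
  rw [cntP, List.countP_eq_zero]
  intro l hl
  have := altLevels_le s l hl
  simp only [decide_eq_true_eq]
  omega

theorem cntP_succ (s : Nat) (p : Nat) :
    cntP (s + 1) p = (if p ≤ s + 1 then 1 else 0) + cntP ((s + 1) / 2) p := by
  rw [cntP, altLevels, List.countP_cons, cntP]
  by_cases h : p ≤ s + 1
  · rw [if_pos h, if_pos (by simp; omega)]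
    omega
  · rw [if_neg h, if_neg (by simp; omega)]
    omega

theorem wsum_char (s : Nat) (f : Int) (p : Nat) (hp : 1 ≤ p) :
    2 * wsum s f p = (cntP s p : Int) * (2 * f + (cntP s p : Int) - 1) := by
  fun_induction wsum s f p with
  | case1 f p => simp [cntP, altLevels]
  | case2 s f p ih =>
      rw [cntP_succ]
      by_cases h : p ≤ s + 1
      · rw [if_pos h, if_pos h]
        push_cast
        linear_combination ih hp
      · have hz : cntP ((s + 1) / 2) p = 0 := cntP_zero _ _ (by omega)
        rw [if_neg h, if_neg h, hz]
        have hih := ih hp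
        rw [hz] at hih
        push_cast at hih ⊢
        linear_combination hih

-- ===== the two element lists are equal =====
theorem elems_eq (Array_ : List Int) (N : Int) (hN : 0 ≤ N) :
    solveElems Array_ N (solvePrefix N (solveWhile N.toNat 1 N (List.replicate (N + 2).toNat 0)))
      = altElems Array_ N (altLevels N.toNat) := by
  obtain ⟨M, rfl⟩ : ∃ m : Nat, N = (m : Int) := ⟨N.toNat, (Int.toNat_of_nonneg hN).symm⟩
  have htn : ((M : Int)).toNat = M := Int.toNat_natCast M
  have hrep : ((M : Int) + 2).toNat = M + 2 := by omega
  unfold solveElems altElems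
  rw [PySem.List.foldl_append_singleton_eq_map, List.nil_append]
  apply List.map_congr_left
  intro i hi
  rw [PySem.List.mem_pyRange_one] at hi
  obtain ⟨h0, hiN⟩ := hi
  obtain ⟨pn, rfl⟩ : ∃ k : Nat, i = (k : Int) := ⟨i.toNat, (Int.toNat_of_nonneg h0).symm⟩
  have hpn : pn < M := by exact_mod_cast hiN
  simp only [Prod.mk.injEq]
  refine ⟨trivial, ?_⟩
  -- left side: the prefix-summed diff array at position pn + 1
  have hc1len : (solveWhile (M : Int).toNat 1 (M : Int) (List.replicate ((M : Int) + 2).toNat 0)).length = M + 2 := by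
    rw [length_solveWhile, List.length_replicate, hrep]
  have e1 : ((pn : Int)) + 1 = ((pn + 1 : Nat) : Int) := by push_cast; ring
  rw [e1, PySem.List.pyGetD_natCast]
  have hchar := prefix_char M
    (solveWhile (M : Int).toNat 1 (M : Int) (List.replicate ((M : Int) + 2).toNat 0))
    (by rw [hc1len]; omega) (pn + 1) (by omega)
  rw [solvePrefix, hchar, if_pos (by omega), htn,
      psum_solveWhile M 1 (M : Int) _ (pn + 1) (by omega) (by simp [hrep]),
      psum_replicate]
  -- right side: the closed-form triangular weight
  have hw := wsum_char M 1 (pn + 1) (by omega)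
  simp only [altWeight]
  have hfil : (((altLevels M).filter (fun l => ((pn + 1 : Nat) : Int) ≤ l)).length : Int)
      = ((cntP M (pn + 1) : Nat) : Int) := by
    rw [cntP, ← List.countP_eq_length_filter]
  rw [hfil]
  set c : Int := ((cntP M (pn + 1) : Nat) : Int) with hc
  have key : (M : Int) * c * (c + 1) = 2 * ((M : Int) * wsum M 1 (pn + 1)) := by
    linear_combination (-(M : Int)) * hw
  rw [key, PySem.Int.floordiv_eq_ediv_of_pos (by norm_num),
      Int.mul_ediv_cancel_left _ (by norm_num)]
  ring

-- ===== scan equivalences =====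
theorem scanA_out (K : Int) (l : List (Int × Int)) (cum : Int)
    (hw : ∀ x ∈ l, 0 ≤ x.2) (hK : K ≤ cum) : solveScan K l (cum + 1) = -1 := by
  induction l generalizing cum with
  | nil => rfl
  | cons x l ih =>
      obtain ⟨v, w⟩ := x
      have hw0 : 0 ≤ w := hw (v, w) List.mem_cons_self
      simp only [solveScan]
      rw [if_neg (by omega)]
      have : cum + 1 + w = (cum + w) + 1 := by ring
      rw [this]
      exact ih (cum + w) (fun x hx => hw x (List.mem_cons_of_mem _ hx)) (by omega)

theorem scanA_eq_scanB (K : Int) (l : List (Int × Int)) (cum : Int)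
    (hw : ∀ x ∈ l, 0 ≤ x.2) (hK : cum < K) :
    solveScan K l (cum + 1) = altScan K l cum := by
  induction l generalizing cum with
  | nil => rfl
  | cons x l ih =>
      obtain ⟨v, w⟩ := x
      simp only [solveScan, altScan]
      by_cases h : K ≤ cum + w
      · rw [if_pos (by omega), if_pos h]
      · rw [if_neg (by omega), if_neg h]
        have : cum + 1 + w = (cum + w) + 1 := by ring
        rw [this]
        exact ih (cum + w) (fun x hx => hw x (List.mem_cons_of_mem _ hx)) (by omega)

theorem alt_weights_nonneg (Array_ : List Int) (N : Int) (hN : 0 ≤ N) :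
    ∀ x ∈ PySem.List.sorted2 (altElems Array_ N (altLevels N.toNat)) Prod.fst Prod.snd, 0 ≤ x.2 := by
  intro x hx
  have hmem : x ∈ altElems Array_ N (altLevels N.toNat) :=
    (PySem.List.sorted2_perm _ _ _ _).mem_iff.mp hx
  simp only [altElems, List.mem_map] at hmem
  obtain ⟨i, _, rfl⟩ := hmem
  simp only [altWeight]
  set t : Int := (((altLevels N.toNat).filter (fun l => i + 1 ≤ l)).length : Int) with ht
  have htn : 0 ≤ t := by positivity
  rw [PySem.Int.floordiv_eq_ediv_of_pos (by omega)]
  have : 0 ≤ N * t * (t + 1) := by positivity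
  exact Int.ediv_nonneg this (by omega)

-- ===== VERDICT (by name: the statement is the Claim_ definition above) =====
theorem solve_spec : Claim_equal_solve := by
  intro Array_ N K _ hpre
  obtain ⟨hN, _⟩ := hpre
  unfold Spec_solve solve solve_alt
  rw [elems_eq Array_ N hN]

  set el := PySem.List.sorted2 (altElems Array_ N (altLevels N.toNat)) Prod.fst Prod.snd with hel
  have hw := alt_weights_nonneg Array_ N hN
  by_cases hK : 1 ≤ K
  · rw [if_pos hK]
    have := scanA_eq_scanB K el 0 hw (by omega)
    simpa using this
  · rw [if_neg hK]
    have := scanA_out K el 0 hw (by omega)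
    simpa using this
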